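-- pv_equiv track=rewrite | github.com/jmartinezgr/Ticademia | Semana-12/Ejercicio_3.py | comprobar
-- ===== SOURCE A (Python) =====
-- def comprobar(string):
--     cont = 0
--     lista = list('saramago')
--     aux = 0
--     for i in string.lower():
--         if i == lista[0]:
--             lista.append(lista.pop(0))
--             aux += 1
--             if aux == 8:
--                 cont+=1
--                 aux=0
--
--     return cont
-- ===== SOURCE B (Python) =====
-- def comprobar(string):
--     cont = 0
--     rest = string.lower()
--     while True:
--         for c in 'saramago':
--             idx = rest.find(c)
--             if idx == -1:
--                 return cont
--             rest = rest[idx + 1:]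
--         cont += 1
-- ===== Notes on version B (the rewrite author's own statement) =====
-- stated objective: faster
-- what changed: Replaces A's Python-level char-by-char scan with a rotating pattern list by greedy repeated matching of the pattern via str.find and slicing, which skips over non-matching characters inside the C-implemented find.
import Mathlib
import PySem

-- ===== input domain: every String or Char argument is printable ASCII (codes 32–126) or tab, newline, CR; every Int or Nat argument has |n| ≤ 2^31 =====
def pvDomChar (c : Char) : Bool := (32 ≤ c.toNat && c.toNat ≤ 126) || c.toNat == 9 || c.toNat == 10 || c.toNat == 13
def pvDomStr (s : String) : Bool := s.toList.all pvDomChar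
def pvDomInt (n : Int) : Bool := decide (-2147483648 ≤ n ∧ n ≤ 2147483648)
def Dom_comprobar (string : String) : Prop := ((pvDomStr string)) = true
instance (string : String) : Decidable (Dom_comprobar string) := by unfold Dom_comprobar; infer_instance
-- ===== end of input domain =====

-- B re-implements A's char-by-char rotating-list scan as greedy repeated matching of
-- 'saramago' using str.find and slicing (objective: alternative decomposition, same exact count).

-- the pattern 'saramago' as a list of characters (shared constant)
def pvPat : List Char := ['s', 'a', 'r', 'a', 'm', 'a', 'g', 'o']

-- ===== PORT A =====
-- one iteration of A's for-loop body; state = (cont, lista, aux)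
def pvStepA (st : Int × List Char × Int) (i : Char) : Int × List Char × Int :=
  let (cont, lista, aux) := st
  if some i = PySem.List.pyGet? lista 0 then            -- i == lista[0]
    match PySem.List.pop? lista 0 with                  -- lista.pop(0)
    | some (x, rest) =>
        let lista2 := rest ++ [x]                       -- lista.append(…)
        let aux2 := aux + 1
        if aux2 = 8 then (cont + 1, lista2, 0) else (cont, lista2, aux2)
    | none => (cont, lista, aux)                        -- unreachable: lista is never empty
  else (cont, lista, aux)

def comprobar (string : String) : Int :=
  ((PySem.Str.lower string).toList.foldl pvStepA (0, pvPat, 0)).1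

-- ===== PORT B =====
-- idx = rest.find(c); if idx == -1 return-signal (none) else rest = rest[idx+1:]
-- (exact: PySem.Chars.find / PySem.List.slice are str.find / slicing on the char list)
def pvStepChar (c : Char) (rest : List Char) : Option (List Char) :=
  let idx := PySem.Chars.find rest [c]
  if idx = -1 then none else some (PySem.List.slice rest (some (idx + 1)) none)

-- the inner `for c in 'saramago'` loop of Source B
def pvMatch : List Char → List Char → Option (List Char)
  | [], rest => some rest
  | c :: cs, rest =>
    match pvStepChar c rest with
    | none => none
    | some r => pvMatch cs r

-- proof-side model of pvStepChar, used to establish the termination facts below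
def pvFdrop (c : Char) : List Char → Option (List Char)
  | [] => none
  | x :: xs => if x = c then some xs else pvFdrop c xs

lemma pvFind_go_fdrop (c : Char) : ∀ (s : List Char) (k : Nat),
    (pvFdrop c s = none ∧ PySem.Chars.find.go [c] s k = -1) ∨
    (∃ j r, pvFdrop c s = some r ∧ PySem.Chars.find.go [c] s k = ((k + j : Nat) : Int) ∧
      r = s.drop (j + 1) ∧ j < s.length) := by
  intro s
  induction s with
  | nil => intro k; left; simp [pvFdrop, PySem.Chars.find.go]
  | cons x xs ih =>
    intro k
    by_cases hx : x = c
    · right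
      refine ⟨0, xs, ?_, ?_, ?_, ?_⟩ <;>
        simp [pvFdrop, hx, PySem.Chars.find.go, List.isPrefixOf]
    · rcases ih (k + 1) with ⟨h1, h2⟩ | ⟨j, r, h1, h2, h3, h4⟩
      · left
        constructor
        · simp [pvFdrop, hx, h1]
        · simp [PySem.Chars.find.go, List.isPrefixOf, Ne.symm hx, h2]
      · right
        refine ⟨j + 1, r, ?_, ?_, ?_, ?_⟩
        · simp [pvFdrop, hx, h1]
        · simp [PySem.Chars.find.go, List.isPrefixOf, Ne.symm hx, h2]; omega
        · simpa using h3
        · simpa using Nat.succ_lt_succ h4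

lemma pvStepChar_eq_fdrop (c : Char) (s : List Char) : pvStepChar c s = pvFdrop c s := by
  unfold pvStepChar
  rcases pvFind_go_fdrop c s 0 with ⟨h1, h2⟩ | ⟨j, r, h1, h2, h3, h4⟩
  · simp [PySem.Chars.find, h2, h1]
  · simp only [PySem.Chars.find, h2, h1]
    have hne : ((0 + j : Nat) : Int) ≠ -1 := by omega
    have hcast : ((0 + j : Nat) : Int) + 1 = ((j + 1 : Nat) : Int) := by push_cast; ring
    rw [if_neg hne, hcast, PySem.List.slice_from_natCast, h3]

lemma pvFdrop_length {c : Char} : ∀ {s r : List Char}, pvFdrop c s = some r → r.length < s.length := by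
  intro s
  induction s with
  | nil => intro r hr; simp [pvFdrop] at hr
  | cons x xs ih =>
    intro r hr
    by_cases hx : x = c
    · simp [pvFdrop, hx] at hr; simp [← hr]
    · simp [pvFdrop, hx] at hr
      exact Nat.lt_succ_of_lt (ih hr)

lemma pvMatch_le : ∀ (ps : List Char) (s r : List Char), pvMatch ps s = some r → r.length ≤ s.length := by
  intro ps
  induction ps with
  | nil => intro s r h; simp [pvMatch] at h; simp [h]
  | cons c cs ih =>
    intro s r h
    simp only [pvMatch, pvStepChar_eq_fdrop] at h
    cases hf : pvFdrop c s with
    | none => simp [hf] at h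
    | some r1 =>
      simp [hf] at h
      exact le_trans (ih r1 r h) (Nat.le_of_lt (pvFdrop_length hf))

lemma pvMatch_lt {ps s r : List Char} (h : pvMatch ps s = some r) (hps : ps ≠ []) :
    r.length < s.length := by
  cases ps with
  | nil => simp at hps
  | cons c cs =>
    simp only [pvMatch, pvStepChar_eq_fdrop] at h
    cases hf : pvFdrop c s with
    | none => simp [hf] at h
    | some r1 =>
      simp [hf] at h
      exact Nat.lt_of_le_of_lt (pvMatch_le cs r1 r h) (pvFdrop_length hf)

-- the `while True` loop of Source B: each completed round adds 1 to cont
def pvLoop (rest : List Char) : Int :=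
  match h : pvMatch pvPat rest with
  | none => 0
  | some r => 1 + pvLoop r
termination_by rest.length
decreasing_by exact pvMatch_lt h (by simp [pvPat])

def comprobar_alt (string : String) : Int :=
  pvLoop (PySem.Str.lower string).toList

-- ===== PRECONDITION & SPEC =====
def Spec_comprobar (string : String) (out : Int) : Prop := out = comprobar_alt string
instance (string : String) (out : Int) : Decidable (Spec_comprobar string out) := by unfold Spec_comprobar; infer_instance

-- ===== CLAIM (what is proved, stated in full; the proofs are below) =====
def Claim_equal_comprobar : Prop := ∀ (string : String), Dom_comprobar string → Spec_comprobar string (comprobar string)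

-- ===== LEMMAS AND PROOFS =====

-- count produced by B when the current round still has pattern suffix ps to match
def pvGCount (ps s : List Char) : Int :=
  match pvMatch ps s with
  | none => 0
  | some r => 1 + pvLoop r

lemma pvLoop_eq (s : List Char) : pvLoop s = pvGCount pvPat s := by
  rw [pvLoop]; split <;> rename_i h <;> simp [pvGCount, h]

lemma pvStepChar_nil (c : Char) : pvStepChar c [] = none := by
  simp [pvStepChar_eq_fdrop, pvFdrop]

lemma pvStepChar_cons (c i : Char) (cs : List Char) :
    pvStepChar c (i :: cs) = if i = c then some cs else pvStepChar c cs := by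
  simp [pvStepChar_eq_fdrop, pvFdrop]

lemma pvGCount_cons_eq {c i : Char} (h : i = c) (ps cs : List Char) :
    pvGCount (c :: ps) (i :: cs) = pvGCount ps cs := by
  simp [pvGCount, pvMatch, pvStepChar_cons, h]

lemma pvGCount_cons_ne {c i : Char} (h : ¬ i = c) (ps cs : List Char) :
    pvGCount (c :: ps) (i :: cs) = pvGCount (c :: ps) cs := by
  simp only [pvGCount, pvMatch, pvStepChar_cons, if_neg h]

lemma pvGCount_nil_right (c : Char) (ps : List Char) : pvGCount (c :: ps) [] = 0 := by
  simp [pvGCount, pvMatch, pvStepChar_nil]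

lemma pvGCount_nil_left (s : List Char) : pvGCount [] s = 1 + pvLoop s := by
  simp [pvGCount, pvMatch]

lemma pvMain : ∀ (cs : List Char) (cont : Int) (aux : Nat), aux < 8 →
    (List.foldl pvStepA (cont, pvPat.drop aux ++ pvPat.take aux, (aux : Int)) cs).1
      = cont + pvGCount (pvPat.drop aux) cs := by
  intro cs
  induction cs with
  | nil =>
    intro cont aux haux
    have hlen : aux < pvPat.length := by simp [pvPat]; omega
    simp only [List.foldl_nil]
    rw [List.drop_eq_getElem_cons hlen, pvGCount_nil_right]
    ring
  | cons i cs ih =>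
    intro cont aux haux
    have hlen : aux < pvPat.length := by simp [pvPat]; omega
    have hdrop : pvPat.drop aux = pvPat[aux] :: pvPat.drop (aux + 1) :=
      List.drop_eq_getElem_cons hlen
    rw [List.foldl_cons, hdrop]
    by_cases hi : i = pvPat[aux]
    · have hstep : pvStepA (cont, (pvPat[aux] :: pvPat.drop (aux + 1)) ++ pvPat.take aux, (aux : Int)) i
          = (if (aux : Int) + 1 = 8 then (cont + 1, pvPat.drop (aux + 1) ++ pvPat.take (aux + 1), (0 : Int))
             else (cont, pvPat.drop (aux + 1) ++ pvPat.take (aux + 1), (aux : Int) + 1)) := by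
        have htake : pvPat.take aux ++ [pvPat[aux]] = pvPat.take (aux + 1) := by
          rw [List.take_add_one]; simp [List.getElem?_eq_getElem hlen]
        simp only [pvStepA, List.cons_append]
        rw [show PySem.List.pyGet? (pvPat[aux] :: (pvPat.drop (aux + 1) ++ pvPat.take aux)) 0
              = some pvPat[aux] from by simp [pysem],
            PySem.List.pop?_zero_cons]
        simp [hi, List.append_assoc, htake]
      rw [hstep]
      by_cases h7 : aux = 7
      · subst h7
        rw [if_pos (by norm_num)]
        have := ih (cont + 1) 0 (by omega)
        simp only [List.drop_zero, List.take_zero] at this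
        simp only [List.append_nil] at this
        have h8 : pvPat.drop (7 + 1) ++ pvPat.take (7 + 1) = pvPat := by simp [pvPat]
        rw [h8]
        rw [show ((0 : Nat) : Int) = (0 : Int) from rfl] at this
        rw [this, pvGCount_cons_eq hi]
        have : pvPat.drop (7 + 1) = [] := by simp [pvPat]
        rw [this]  -- pattern suffix after position 7 is empty
        rw [pvGCount_nil_left, pvLoop_eq]
        ring
      · rw [if_neg (by omega)]
        have := ih cont (aux + 1) (by omega)
        rw [show (((aux + 1 : Nat)) : Int) = (aux : Int) + 1 from by push_cast; ring] at this
        rw [this, pvGCount_cons_eq hi]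
    · have hstep : pvStepA (cont, (pvPat[aux] :: pvPat.drop (aux + 1)) ++ pvPat.take aux, (aux : Int)) i
          = (cont, (pvPat[aux] :: pvPat.drop (aux + 1)) ++ pvPat.take aux, (aux : Int)) := by
        simp only [pvStepA, List.cons_append]
        rw [show PySem.List.pyGet? (pvPat[aux] :: (pvPat.drop (aux + 1) ++ pvPat.take aux)) 0
              = some pvPat[aux] from by simp [pysem]]
        simp [hi]
      rw [hstep, pvGCount_cons_ne hi, ← hdrop]
      exact ih cont aux haux

-- ===== VERDICT (by name: the statement is the Claim_ definition above) =====
theorem comprobar_spec : Claim_equal_comprobar := by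
  intro string _
  unfold Spec_comprobar comprobar comprobar_alt
  have := pvMain (PySem.Str.lower string).toList 0 0 (by omega)
  simp only [List.drop_zero, List.take_zero, List.append_nil, Nat.cast_zero] at this
  rw [this, pvLoop_eq]
  ring
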